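-- pv_equiv track=rewrite | github.com/Pravanop/mixing-enthalpy | calculateEnthalpy/helper_functions/grid_code.py | create_multinary
-- ===== SOURCE A (Python) =====
-- from typing import Union
-- from itertools import combinations
--
-- def create_multinary(
-- 		element_list: list[str],
-- 		no_comb: Union[list[int], str]
-- ) -> dict[int: list[str]]:
-- 	"""
--
-- 	Args:
-- 		element_list: The list of element symbols to create combinations for
-- 		no_comb:  A list of number to create combinations for. For ex. [2,3] means create binary and ternary. Can take
-- 	value "all" for combinations from 2-7.
--
-- 	Returns: a dictionary of the form
-- 	{
-- 	3: ['E1-E2-E3', 'E1-E3-E4'....],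
-- 	2: ....
-- 	}
--
-- 	"""
-- 	if no_comb == "all": #taking septenary as the limit, rarely used option.
-- 		no_comb = list(range(2, 8))
--
-- 	result = {}
-- 	for idx, comb in enumerate(no_comb):
-- 		temp_joint = list(combinations(element_list, comb))
-- 		s = '-'  # To join the element, standard protocol
-- 		final_joint = sorted(
-- 			{s.join(sorted(pair)) for pair in temp_joint}
-- 			# {s.join(pair) for pair in temp_joint}
-- 		)
-- 		if final_joint:  # just a measure
-- 			result[comb] = final_joint
--
-- 	return result
-- ===== SOURCE B (Python) =====
-- from typing import Union
--
--
-- def _choose(items, r):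
--     """All r-element combinations of items, picking indices in increasing order."""
--     if r == 0:
--         return [()]
--     if r > len(items):
--         return []
--     head, rest = items[0], items[1:]
--     return [(head,) + tail for tail in _choose(rest, r - 1)] + _choose(rest, r)
--
--
-- def create_multinary(
--         element_list: list[str],
--         no_comb: Union[list[int], str]
-- ) -> dict[int, list[str]]:
--     if no_comb == "all":
--         no_comb = list(range(2, 8))
--     result = {}
--     for comb in no_comb:
--         names = sorted({'-'.join(sorted(tup)) for tup in _choose(element_list, comb)})
--         if names:
--             result[comb] = names
--     return result
-- ===== Notes on version B (the rewrite author's own statement) =====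
-- stated objective: alternative
-- what changed: Replaces the itertools.combinations library call with a hand-written recursive index-order combination generator (choose head + recurse on tail, with a size prune) and drops the unused enumerate; dedup-set, canonical join and sorts are unchanged.
import Mathlib
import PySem

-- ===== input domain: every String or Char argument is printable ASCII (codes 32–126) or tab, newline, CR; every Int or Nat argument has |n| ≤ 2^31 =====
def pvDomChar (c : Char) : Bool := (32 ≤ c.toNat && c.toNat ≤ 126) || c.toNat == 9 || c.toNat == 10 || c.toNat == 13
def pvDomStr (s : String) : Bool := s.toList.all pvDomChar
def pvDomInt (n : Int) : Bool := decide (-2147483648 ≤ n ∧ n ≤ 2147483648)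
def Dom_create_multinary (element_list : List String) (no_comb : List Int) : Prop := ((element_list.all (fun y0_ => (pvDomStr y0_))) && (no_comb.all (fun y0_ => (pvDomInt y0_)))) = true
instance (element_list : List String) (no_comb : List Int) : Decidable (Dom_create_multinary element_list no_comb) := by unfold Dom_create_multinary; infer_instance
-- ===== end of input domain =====

-- B replaces the itertools.combinations library enumeration with a hand-written recursive
-- index-order combination generator (alternative decomposition, no speed claim).
-- The Lean signature fixes no_comb : List Int, so the Python "all" string branch is not part of
-- the ported domain (both ports cover only the list branch).

-- ===== PORT A =====
-- itertools.combinations(element_list, comb) → PySem.List.combinations; comb is a count, and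
-- Pre_ guarantees 0 ≤ comb (Python raises ValueError on a negative r), so .toNat is exact there.
def create_multinary (element_list : List String) (no_comb : List Int) : List (Int × List String) :=
  ((PySem.List.enumerate no_comb).foldl
    (fun (result : PySem.Dict Int (List String)) p =>
      let comb := p.2
      let temp_joint := PySem.List.combinations element_list comb.toNat
      let final_joint :=
        PySem.List.sorted
          (PySem.Set.ofList (temp_joint.map (fun pair => PySem.Str.join "-" (PySem.List.sorted pair (fun x => x)))))
          (fun x => x)
      if final_joint ≠ [] then PySem.Dict.insert result comb final_joint else result)
    (PySem.Dict.empty)).items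

-- ===== PORT B =====
-- hand-written generator from Source B's _choose, step for step
def pvChoose (items : List String) (r : Int) : List (List String) :=
  if r = 0 then [[]]
  else if r > (items.length : Int) then []
  else
    match items with
    | [] => []  -- unreachable for 0 ≤ r (then r > 0 = length); Python B raises here (r < 0, excluded by Pre_)
    | head :: rest => ((pvChoose rest (r - 1)).map (fun tail => head :: tail)) ++ pvChoose rest r
termination_by items.length
decreasing_by all_goals simp_all

def pvAltLoop (element_list : List String) (rest : List Int) (result : PySem.Dict Int (List String)) :
    PySem.Dict Int (List String) :=
  match rest with
  | [] => result
  | comb :: rest' =>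
      let names :=
        PySem.List.sorted
          (PySem.Set.ofList ((pvChoose element_list comb).map (fun tup => PySem.Str.join "-" (PySem.List.sorted tup (fun x => x)))))
          (fun x => x)
      pvAltLoop element_list rest' (if names = [] then result else PySem.Dict.insert result comb names)

def create_multinary_alt (element_list : List String) (no_comb : List Int) : List (Int × List String) :=
  (pvAltLoop element_list no_comb PySem.Dict.empty).items

-- ===== PRECONDITION & SPEC =====
-- Pre_ excludes negative combination sizes: itertools.combinations raises ValueError for r < 0.
def Pre_create_multinary (element_list : List String) (no_comb : List Int) : Prop :=
  ∀ c ∈ no_comb, 0 ≤ c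
instance (element_list : List String) (no_comb : List Int) : Decidable (Pre_create_multinary element_list no_comb) := by
  unfold Pre_create_multinary; infer_instance

def pvWitness_create_multinary : List String × List Int := (["Fe", "Ni", "Cr"], [2, 3])

def Spec_create_multinary (element_list : List String) (no_comb : List Int) (out : List (Int × List String)) : Prop := out = create_multinary_alt element_list no_comb
instance (element_list : List String) (no_comb : List Int) (out : List (Int × List String)) : Decidable (Spec_create_multinary element_list no_comb out) := by unfold Spec_create_multinary; infer_instance

-- ===== CLAIM =====
def Claim_equal_create_multinary : Prop := ∀ (element_list : List String) (no_comb : List Int), Dom_create_multinary element_list no_comb → Pre_create_multinary element_list no_comb → Spec_create_multinary element_list no_comb (create_multinary element_list no_comb)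

-- ===== LEMMAS AND PROOFS =====
theorem pvChoose_eq_combinations (items : List String) (r : Int) (hr : 0 ≤ r) :
    pvChoose items r = PySem.List.combinations items r.toNat := by
  induction items generalizing r with
  | nil =>
      rw [pvChoose]
      split_ifs with h0 hbig
      · simp [h0, PySem.List.combinations_zero]
      · obtain ⟨n, hn⟩ : ∃ n : Nat, r.toNat = n + 1 := ⟨r.toNat - 1, by omega⟩
        rw [hn, PySem.List.combinations_nil_succ]
      · exact absurd hbig (by simp; omega)
  | cons head rest ih =>
      rw [pvChoose]
      split_ifs with h0 hbig
      · simp [h0, PySem.List.combinations_zero]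
      · rw [PySem.List.combinations_eq_nil_of_length_lt _ (by omega : (head :: rest).length < r.toNat)]
      · obtain ⟨n, hn⟩ : ∃ n : Nat, r.toNat = n + 1 := ⟨r.toNat - 1, by omega⟩
        rw [hn, PySem.List.combinations_cons_succ,
            ih (r - 1) (by omega), ih r hr, hn]
        have hm : (r - 1).toNat = n := by omega
        rw [hm]

theorem pvAltLoop_eq (element_list : List String) (no_comb : List Int) (s : Int)
    (acc : PySem.Dict Int (List String)) (hpre : ∀ c ∈ no_comb, 0 ≤ c) :
    (PySem.List.enumerate no_comb s).foldl
      (fun (result : PySem.Dict Int (List String)) p =>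
        let comb := p.2
        let temp_joint := PySem.List.combinations element_list comb.toNat
        let final_joint :=
          PySem.List.sorted
            (PySem.Set.ofList (temp_joint.map (fun pair => PySem.Str.join "-" (PySem.List.sorted pair (fun x => x)))))
            (fun x => x)
        if final_joint ≠ [] then PySem.Dict.insert result comb final_joint else result)
      acc
    = pvAltLoop element_list no_comb acc := by
  induction no_comb generalizing s acc with
  | nil => simp [PySem.List.enumerate, pvAltLoop]
  | cons c rest ih =>
      rw [PySem.List.enumerate_cons, List.foldl_cons, pvAltLoop]
      have hc : 0 ≤ c := hpre c (by simp)
      have hrest : ∀ x ∈ rest, 0 ≤ x := fun x hx => hpre x (by simp [hx])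
      rw [ih (s + 1) _ hrest]
      congr 1
      simp only [← pvChoose_eq_combinations element_list c hc]
      split_ifs with h1 h2 <;> simp_all

-- ===== VERDICT =====
theorem create_multinary_spec : Claim_equal_create_multinary := by
  intro element_list no_comb _ hpre
  unfold Spec_create_multinary create_multinary create_multinary_alt
  exact congrArg PySem.Dict.items (pvAltLoop_eq element_list no_comb 0 PySem.Dict.empty hpre)
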